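-- pv_equiv track=rewrite | github.com/josephxwang/aoc23 | 15.py | part2
-- ===== SOURCE A (Python) =====
-- def part2(lines):
--     # return
--     steps = lines[0].split(',')
--     boxs = [[] for _ in range(256)] # list of labels for each box
--     ns = [{} for _ in range(256)] # hash map of lenses for each box
--     for step in steps:
--         if step[-1].isdigit(): # parse
--             n = int(step[-1])
--             op = step[-2]
--             label = step[:-2]
--         else:
--             op = step[-1]
--             label = step[:-1]
--         i = 0 # box number
--         for c in label:
--             i = (i+ord(c))*17%256
--         if op == '-': # remove
--             if label in boxs[i]:
--                 boxs[i].remove(label)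
--                 ns[i].pop(label)
--         elif op == '=':
--             if label in boxs[i]:
--                 ns[i][label] = n
--             else:
--                 boxs[i].append(label)
--                 ns[i][label] = n
--     tot = 0
--     for i,box in enumerate(boxs):
--         for j,label in enumerate(box):
--             tot += (i+1)*(j+1)*ns[i][label]
--     return tot
-- ===== SOURCE B (Python) =====
-- def _boxhash(label):
--     h = 0
--     for c in label:
--         h = (h + ord(c)) * 17 % 256
--     return h
--
-- def part2(lines):
--     # One global insertion-ordered dict of lenses instead of 256 boxes + 256 focal maps.
--     steps = lines[0].split(',')
--     lenses = {}  # label -> focal length; dict order models the boxes' slot order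
--     for step in steps:
--         if step[-1].isdigit():
--             n = int(step[-1])
--             op = step[-2]
--             label = step[:-2]
--         else:
--             op = step[-1]
--             label = step[:-1]
--         if op == '-':
--             lenses.pop(label, None)
--         elif op == '=':
--             lenses[label] = n
--     total = 0
--     for b in range(256):
--         slot = 0
--         for label, focal in lenses.items():
--             if _boxhash(label) == b:
--                 slot += 1
--                 total += (b + 1) * slot * focal
--     return total
-- ===== Notes on version B (the rewrite author's own statement) =====
-- stated objective: alternative
-- what changed: B replaces A's 256 box label-lists plus 256 per-box focal dicts by a single global insertion-ordered dict of lenses (assign on '=', pop on '-'), and scores it by a per-box counter scan over the dict items instead of A's nested enumerate over the 256 boxes.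
import Mathlib
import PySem

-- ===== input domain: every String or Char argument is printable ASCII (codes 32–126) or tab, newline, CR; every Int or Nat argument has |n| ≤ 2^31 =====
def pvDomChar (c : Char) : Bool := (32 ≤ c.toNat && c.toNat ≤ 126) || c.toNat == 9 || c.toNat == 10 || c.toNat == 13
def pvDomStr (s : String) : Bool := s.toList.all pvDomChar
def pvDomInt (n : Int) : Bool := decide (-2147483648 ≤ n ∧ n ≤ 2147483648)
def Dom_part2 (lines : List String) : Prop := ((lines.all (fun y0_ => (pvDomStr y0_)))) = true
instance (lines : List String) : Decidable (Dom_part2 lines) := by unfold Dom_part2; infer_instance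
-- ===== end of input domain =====

-- B replaces A's 256 box lists + 256 focal dicts by ONE insertion-ordered dict of lenses,
-- scored by a counter scan per box (objective: simpler data representation; same asymptotic cost).

-- ===== PORT A =====
-- parse of one step: returns (op, label, n) — none where Python raises IndexError.
-- n falls back to the previous loop iteration's n (Python reuses the leftover local).
def parseA (step : List Char) (nprev : Int) : Option (Char × List Char × Int) :=
  match PySem.List.pyGet? step (-1) with
  | none => none
  | some last =>
    if last.isDigit then
      match PySem.List.pyGet? step (-2) with
      | none => none
      | some op => some (op, PySem.List.slice step none (some (-2)), (PySem.Int.ofChars? [last]).getD 0)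
    else some (last, PySem.List.slice step none (some (-1)), nprev)

def stepA (st : (List (List (List Char)) × List (PySem.Dict (List Char) Int)) × Int) (step : List Char) :
    (List (List (List Char)) × List (PySem.Dict (List Char) Int)) × Int :=
  match parseA step st.2 with
  | none => st
  | some (op, label, n) =>
    let boxs := st.1.1
    let ns := st.1.2
    let i : Int := label.foldl (fun i c => PySem.Int.mod ((i + (c.toNat : Int)) * 17) 256) 0
    let box := PySem.List.pyGetD boxs i []
    if op = '-' then
      if label ∈ box then
        ((PySem.List.pySetD boxs i ((PySem.List.remove? box label).getD box),
          PySem.List.pySetD ns i ((PySem.List.pyGetD ns i PySem.Dict.empty).erase label)), n)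
      else ((boxs, ns), n)
    else if op = '=' then
      if label ∈ box then
        ((boxs, PySem.List.pySetD ns i ((PySem.List.pyGetD ns i PySem.Dict.empty).insert label n)), n)
      else
        ((PySem.List.pySetD boxs i (box ++ [label]),
          PySem.List.pySetD ns i ((PySem.List.pyGetD ns i PySem.Dict.empty).insert label n)), n)
    else ((boxs, ns), n)

def part2 (lines : List String) : Int :=
  match PySem.List.pyGet? lines 0 with
  | none => 0  -- Python raises IndexError here (outside Pre_)
  | some l0 =>
    let steps := PySem.Chars.splitOn l0.toList [',']
    let st := steps.foldl stepA ((List.replicate 256 [], List.replicate 256 PySem.Dict.empty), 0)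
    (PySem.List.enumerate st.1.1).foldl (fun tot p =>
      (PySem.List.enumerate p.2).foldl (fun tot q =>
        tot + (p.1 + 1) * (q.1 + 1) *
          ((PySem.List.pyGetD st.1.2 p.1 PySem.Dict.empty).getD q.2 0)) tot) 0

-- ===== PORT B =====
def boxhashB (label : List Char) : Int :=
  label.foldl (fun h c => PySem.Int.mod ((h + (c.toNat : Int)) * 17) 256) 0

def parseB (step : List Char) (nprev : Int) : Option (Char × List Char × Int) :=
  match PySem.List.pyGet? step (-1) with
  | none => none
  | some last =>
    if last.isDigit then
      match PySem.List.pyGet? step (-2) with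
      | none => none
      | some op => some (op, PySem.List.slice step none (some (-2)), (PySem.Int.ofChars? [last]).getD 0)
    else some (last, PySem.List.slice step none (some (-1)), nprev)

def stepB (st : PySem.Dict (List Char) Int × Int) (step : List Char) :
    PySem.Dict (List Char) Int × Int :=
  match parseB step st.2 with
  | none => st
  | some (op, label, n) =>
    if op = '-' then (st.1.erase label, n)       -- lenses.pop(label, None)
    else if op = '=' then (st.1.insert label n, n)
    else (st.1, n)

def part2_alt (lines : List String) : Int :=
  match PySem.List.pyGet? lines 0 with
  | none => 0  -- Python raises IndexError here (outside Pre_)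
  | some l0 =>
    let steps := PySem.Chars.splitOn l0.toList [',']
    let lenses := (steps.foldl stepB (PySem.Dict.empty, 0)).1
    (PySem.List.pyRange 0 256 1).foldl (fun total b =>
      (lenses.items.foldl (fun (sj : Int × Int) q =>
        if boxhashB q.1 = b then (sj.1 + 1, sj.2 + (b + 1) * (sj.1 + 1) * q.2) else sj)
        (0, total)).2) 0

-- ===== PRECONDITION & SPEC =====
def pvSteps (lines : List String) : List (List Char) :=
  PySem.Chars.splitOn (lines.headD "").toList [',']

def pvEndsDigit (s : List Char) : Bool := (s.getLast?.map Char.isDigit).getD false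

-- Pre_ = exactly the inputs on which Python A returns: a nonempty lines list, no empty step
-- (IndexError on step[-1]), no lone-digit step (IndexError on step[-2]), and every step ending
-- in '=' preceded by some digit-ending step (else NameError/UnboundLocalError on n).
def Pre_part2 (lines : List String) : Prop :=
  lines ≠ [] ∧
  (∀ s ∈ pvSteps lines, s ≠ [] ∧ (pvEndsDigit s = true → 2 ≤ s.length)) ∧
  (∀ k < (pvSteps lines).length, (pvSteps lines).getD k [] ≠ [] →
    ((pvSteps lines).getD k []).getLast? = some '=' →
    ∃ j < k, pvEndsDigit ((pvSteps lines).getD j []) = true)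
instance (lines : List String) : Decidable (Pre_part2 lines) := by unfold Pre_part2; infer_instance

def pvWitness_part2 : List String := ["rn=1,cm-,qp=3,cm=2,qp-,pc=4,ot=9,ab=5,pc-,pc=6,ot=7"]

def Spec_part2 (lines : List String) (out : Int) : Prop := out = part2_alt lines
instance (lines : List String) (out : Int) : Decidable (Spec_part2 lines out) := by unfold Spec_part2; infer_instance

-- ===== CLAIM (what is proved, stated in full; the proofs are below) =====
def Claim_equal_part2 : Prop := ∀ (lines : List String), Dom_part2 lines → Pre_part2 lines → Spec_part2 lines (part2 lines)

-- ===== LEMMAS AND PROOFS =====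

-- the sub-list of the global lens dict that lives in box b
def boxF (lenses : PySem.Dict (List Char) Int) (b : Int) : List (List Char × Int) :=
  lenses.items.filter (fun p => boxhashB p.1 == b)

-- the simulation invariant between A's (boxs, ns) and B's lenses
def SimInv (boxs : List (List (List Char))) (ns : List (PySem.Dict (List Char) Int))
    (lenses : PySem.Dict (List Char) Int) : Prop :=
  boxs.length = 256 ∧ ns.length = 256 ∧ lenses.keys.Nodup ∧
  ∀ b : Int, 0 ≤ b → b < 256 →
    PySem.List.pyGetD boxs b [] = (boxF lenses b).map Prod.fst ∧
    (PySem.List.pyGetD ns b PySem.Dict.empty).items = boxF lenses b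

lemma parseA_eq_parseB : parseA = parseB := rfl

lemma boxhash_aux (l : List Char) : ∀ i : Int, 0 ≤ i → i < 256 →
    0 ≤ l.foldl (fun h c => PySem.Int.mod ((h + (c.toNat : Int)) * 17) 256) i ∧
      l.foldl (fun h c => PySem.Int.mod ((h + (c.toNat : Int)) * 17) 256) i < 256 := by
  induction l with
  | nil => exact fun i h1 h2 => ⟨h1, h2⟩
  | cons c cs ih =>
    intro i h1 h2
    simp only [List.foldl_cons]
    exact ih _ (PySem.Int.mod_nonneg _ (by norm_num)) (PySem.Int.mod_lt _ (by norm_num))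

lemma boxhash_bounds (l : List Char) : 0 ≤ boxhashB l ∧ boxhashB l < 256 :=
  boxhash_aux l 0 le_rfl (by norm_num)


lemma pyGetD_pySetD_int {α : Type} (xs : List α) (i b : Int) (v d : α)
    (hi0 : 0 ≤ i) (hi : i < (xs.length : Int)) (hb0 : 0 ≤ b) (hb : b < (xs.length : Int)) :
    PySem.List.pyGetD (PySem.List.pySetD xs i v) b d = if b = i then v else PySem.List.pyGetD xs b d := by
  obtain ⟨iN, rfl⟩ : ∃ m : Nat, i = (m : Int) := ⟨i.toNat, (Int.toNat_of_nonneg hi0).symm⟩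
  obtain ⟨bN, rfl⟩ : ∃ m : Nat, b = (m : Int) := ⟨b.toNat, (Int.toNat_of_nonneg hb0).symm⟩
  rw [PySem.List.pyGetD_pySetD_natCast xs iN bN v d (by exact_mod_cast hi)]
  by_cases hbe : bN = iN
  · simp [hbe]
  · rw [if_neg hbe, if_neg (by exact_mod_cast hbe)]

lemma mem_map_fst_boxF (lenses : PySem.Dict (List Char) Int) (label : List Char) :
    label ∈ (boxF lenses (boxhashB label)).map Prod.fst ↔ label ∈ lenses.keys := by
  constructor
  · intro h
    obtain ⟨p, hp, rfl⟩ := List.mem_map.mp h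
    exact PySem.Dict.mem_keys_of_mem_items _ (List.mem_of_mem_filter hp)
  · intro h
    obtain ⟨p, hp, rfl⟩ := List.mem_map.mp (show label ∈ lenses.items.map Prod.fst from h)
    exact List.mem_map.mpr ⟨p, List.mem_filter.mpr ⟨hp, by simp⟩, rfl⟩

lemma map_fst_filter_ne (label : List Char) (l : List (List Char × Int))
    (hnd : (l.map Prod.fst).Nodup) :
    (l.filter (fun p => !(p.1 == label))).map Prod.fst = (l.map Prod.fst).erase label := by
  induction l with
  | nil => simp
  | cons p l ih =>
    rw [List.map_cons] at hnd
    by_cases hpl : p.1 = label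
    · subst hpl
      rw [List.filter_cons_of_neg (by simp), List.map_cons, List.erase_cons_head]
      have hall : ∀ q ∈ l, (!(q.1 == p.1)) = true := by
        intro q hq
        have hne : q.1 ≠ p.1 := by
          intro he
          exact (List.nodup_cons.mp hnd).1 (he ▸ List.mem_map.mpr ⟨q, hq, rfl⟩)
        simpa using hne
      rw [List.filter_eq_self.mpr hall]
    · rw [List.filter_cons_of_pos (by simpa using hpl), List.map_cons, List.map_cons,
        List.erase_cons_tail (by simpa using hpl), ih (List.nodup_cons.mp hnd).2]

lemma boxF_erase (lenses : PySem.Dict (List Char) Int) (label : List Char) (b : Int) :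
    boxF (lenses.erase label) b = (boxF lenses b).filter (fun p => !(p.1 == label)) := by
  simp only [boxF, PySem.Dict.erase, List.filter_filter]
  exact List.filter_congr (fun p _ => Bool.and_comm _ _)

lemma boxF_key_ne (lenses : PySem.Dict (List Char) Int) (b : Int) (label : List Char)
    (hb : b ≠ boxhashB label) : ∀ p ∈ boxF lenses b, (!(p.1 == label)) = true := by
  intro p hp
  have h2 := (List.mem_filter.mp hp).2
  rw [beq_iff_eq] at h2
  simp only [Bool.not_eq_eq_eq_not, Bool.not_true, beq_eq_false_iff_ne, ne_eq]
  intro he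
  apply hb
  rw [← h2, he]

lemma boxF_insert_of_contains (lenses : PySem.Dict (List Char) Int) (label : List Char)
    (n b : Int) (hc : lenses.contains label = true) :
    boxF (lenses.insert label n) b =
      (boxF lenses b).map (fun p => if p.1 == label then (label, n) else p) := by
  unfold boxF
  rw [PySem.Dict.items_insert, hc, if_pos rfl, List.filter_map]
  congr 1
  apply List.filter_congr
  intro p _
  by_cases hpl : p.1 = label
  · simp [Function.comp, hpl]
  · simp [Function.comp, hpl]

lemma boxF_insert_of_not_contains (lenses : PySem.Dict (List Char) Int) (label : List Char)
    (n b : Int) (hc : lenses.contains label = false) :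
    boxF (lenses.insert label n) b =
      boxF lenses b ++ (if boxhashB label = b then [(label, n)] else []) := by
  unfold boxF
  rw [PySem.Dict.items_insert, hc, if_neg (by simp), List.filter_append]
  congr 1
  by_cases hb : boxhashB label = b
  · simp [hb]
  · simp [hb]

lemma nodup_keys_erase (lenses : PySem.Dict (List Char) Int) (label : List Char)
    (h : lenses.keys.Nodup) : (lenses.erase label).keys.Nodup :=
  List.Nodup.sublist
    (show ((lenses.items.filter (fun p => !(p.1 == label))).map (fun p => p.1)).Sublist
        (lenses.items.map (fun p => p.1)) from List.filter_sublist.map _) h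

lemma nodup_map_fst_boxF (lenses : PySem.Dict (List Char) Int) (b : Int)
    (h : lenses.keys.Nodup) : ((boxF lenses b).map Prod.fst).Nodup :=
  List.Nodup.sublist
    (show ((boxF lenses b).map Prod.fst).Sublist (lenses.items.map (fun p => p.1)) from
      List.filter_sublist.map _) h

lemma step_pres (stA' : (List (List (List Char)) × List (PySem.Dict (List Char) Int)) × Int)
    (stB' : PySem.Dict (List Char) Int × Int) (step : List Char)
    (h : SimInv stA'.1.1 stA'.1.2 stB'.1) (hn : stA'.2 = stB'.2) :
    SimInv (stepA stA' step).1.1 (stepA stA' step).1.2 (stepB stB' step).1 ∧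
      (stepA stA' step).2 = (stepB stB' step).2 := by
  obtain ⟨⟨boxs, ns⟩, nA⟩ := stA'
  obtain ⟨lenses, nB⟩ := stB'
  simp only at h hn
  subst hn
  unfold stepA stepB
  rw [parseA_eq_parseB]
  cases hp : parseB step nA with
  | none => exact ⟨h, rfl⟩
  | some t =>
    obtain ⟨op, label, n⟩ := t
    simp only
    obtain ⟨hlb, hln, hnd, hinv⟩ := h
    have hH := boxhash_bounds label
    have hi : (label.foldl (fun i c => PySem.Int.mod ((i + (c.toNat : Int)) * 17) 256) 0) = boxhashB label := rfl
    rw [hi]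
    have hbox := (hinv (boxhashB label) hH.1 hH.2).1
    have hns := (hinv (boxhashB label) hH.1 hH.2).2
    have hkeys : label ∈ (PySem.List.pyGetD boxs (boxhashB label) []) ↔ label ∈ lenses.keys := by
      rw [hbox]; exact mem_map_fst_boxF lenses label
    have hlbI : boxhashB label < ((boxs.length : Nat) : Int) := by rw [hlb]; exact hH.2
    have hlnI : boxhashB label < ((ns.length : Nat) : Int) := by rw [hln]; exact hH.2
    refine ?_
    by_cases hop1 : op = '-'
    · rw [if_pos hop1, if_pos hop1]
      by_cases hmem : label ∈ PySem.List.pyGetD boxs (boxhashB label) []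
      · rw [if_pos hmem]
        have hc : lenses.contains label = true :=
          (PySem.Dict.contains_iff_mem_keys lenses label).mpr (hkeys.mp hmem)
        refine ⟨⟨?_, ?_, nodup_keys_erase lenses label hnd, ?_⟩, rfl⟩
        · rw [PySem.List.length_pySetD]; exact hlb
        · rw [PySem.List.length_pySetD]; exact hln
        · intro b hb0 hb1
          rw [pyGetD_pySetD_int boxs _ b _ _ hH.1 hlbI hb0 (by rw [hlb]; exact hb1),
            pyGetD_pySetD_int ns _ b _ _ hH.1 hlnI hb0 (by rw [hln]; exact hb1)]
          by_cases hbe : b = boxhashB label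
          · rw [if_pos hbe, if_pos hbe]
            constructor
            · rw [PySem.List.remove?_eq_some_erase _ _ hmem, Option.getD_some, hbox, hbe,
                boxF_erase, map_fst_filter_ne label _ (nodup_map_fst_boxF lenses _ hnd)]
            · show ((PySem.List.pyGetD ns (boxhashB label) PySem.Dict.empty).items.filter _) = _
              rw [hns, hbe, boxF_erase]
          · rw [if_neg hbe, if_neg hbe]
            have hfix : boxF (lenses.erase label) b = boxF lenses b := by
              rw [boxF_erase]
              exact List.filter_eq_self.mpr (boxF_key_ne lenses b label hbe)
            rw [hfix]
            exact hinv b hb0 hb1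
      · rw [if_neg hmem]
        have hc : lenses.contains label = false := by
          rw [← Bool.not_eq_true]
          intro hcc
          exact hmem (hkeys.mpr ((PySem.Dict.contains_iff_mem_keys lenses label).mp hcc))
        have hid : lenses.erase label = lenses := by
          apply PySem.Dict.ext
          show lenses.items.filter _ = lenses.items
          apply List.filter_eq_self.mpr
          intro p hp
          simp only [Bool.not_eq_eq_eq_not, Bool.not_true, beq_eq_false_iff_ne, ne_eq]
          intro he
          apply hmem
          rw [hbox, ← he]
          exact List.mem_map.mpr ⟨p, List.mem_filter.mpr ⟨hp, by simp [he]⟩, rfl⟩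
        rw [hid]
        exact ⟨⟨hlb, hln, hnd, hinv⟩, rfl⟩
    · rw [if_neg hop1, if_neg hop1]
      by_cases hop2 : op = '='
      · rw [if_pos hop2, if_pos hop2]
        have hnsk : (PySem.List.pyGetD ns (boxhashB label) PySem.Dict.empty).keys =
            (boxF lenses (boxhashB label)).map Prod.fst := by
          show (PySem.List.pyGetD ns (boxhashB label) PySem.Dict.empty).items.map _ = _
          rw [hns]
        have hnsc : (PySem.List.pyGetD ns (boxhashB label) PySem.Dict.empty).contains label =
            lenses.contains label := by
          by_cases hcl : lenses.contains label = true
          · rw [hcl, (PySem.Dict.contains_iff_mem_keys _ label).mpr]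
            rw [hnsk]
            exact (mem_map_fst_boxF lenses label).mpr
              ((PySem.Dict.contains_iff_mem_keys lenses label).mp hcl)
          · rw [Bool.not_eq_true] at hcl
            rw [hcl, ← Bool.not_eq_true]
            intro hcc
            have := (PySem.Dict.contains_iff_mem_keys _ label).mp hcc
            rw [hnsk] at this
            have := (mem_map_fst_boxF lenses label).mp this
            rw [(PySem.Dict.contains_iff_mem_keys lenses label).mpr this] at hcl
            exact absurd hcl (by simp)
        by_cases hmem : label ∈ PySem.List.pyGetD boxs (boxhashB label) []
        · rw [if_pos hmem]
          have hc : lenses.contains label = true :=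
            (PySem.Dict.contains_iff_mem_keys lenses label).mpr (hkeys.mp hmem)
          refine ⟨⟨hlb, ?_, PySem.Dict.nodup_keys_insert lenses label n hnd, ?_⟩, rfl⟩
          · rw [PySem.List.length_pySetD]; exact hln
          · intro b hb0 hb1
            rw [pyGetD_pySetD_int ns _ b _ _ hH.1 hlnI hb0 (by rw [hln]; exact hb1)]
            by_cases hbe : b = boxhashB label
            · rw [if_pos hbe]
              constructor
              · rw [(hinv b hb0 hb1).1, hbe, boxF_insert_of_contains lenses label n _ hc,
                  List.map_map]
                apply (List.map_congr_left ?_).symm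
                intro p _
                by_cases hpl : p.1 = label
                · simp [Function.comp, hpl]
                · simp [Function.comp, hpl]
              · show ((PySem.List.pyGetD ns (boxhashB label) PySem.Dict.empty).insert label n).items = _
                rw [PySem.Dict.items_insert, if_pos (by rw [hnsc]; exact hc), hns, hbe,
                  boxF_insert_of_contains lenses label n _ hc]
            · rw [if_neg hbe]
              have hfix : boxF (lenses.insert label n) b = boxF lenses b := by
                rw [boxF_insert_of_contains lenses label n b hc]
                have hid : ∀ p ∈ boxF lenses b,
                    (fun p : List Char × Int => if p.1 == label then (label, n) else p) p = p := by
                  intro p hp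
                  have hne := boxF_key_ne lenses b label hbe p hp
                  rw [Bool.not_eq_eq_eq_not, Bool.not_true] at hne
                  simp [hne]
                rw [List.map_congr_left hid, List.map_id']
              rw [hfix]
              exact hinv b hb0 hb1
        · rw [if_neg hmem]
          have hc : lenses.contains label = false := by
            rw [← Bool.not_eq_true]
            intro hcc
            exact hmem (hkeys.mpr ((PySem.Dict.contains_iff_mem_keys lenses label).mp hcc))
          refine ⟨⟨?_, ?_, PySem.Dict.nodup_keys_insert lenses label n hnd, ?_⟩, rfl⟩
          · rw [PySem.List.length_pySetD]; exact hlb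
          · rw [PySem.List.length_pySetD]; exact hln
          · intro b hb0 hb1
            rw [pyGetD_pySetD_int boxs _ b _ _ hH.1 hlbI hb0 (by rw [hlb]; exact hb1),
              pyGetD_pySetD_int ns _ b _ _ hH.1 hlnI hb0 (by rw [hln]; exact hb1)]
            by_cases hbe : b = boxhashB label
            · subst hbe
              rw [if_pos rfl, if_pos rfl]
              constructor
              · rw [hbox, boxF_insert_of_not_contains lenses label n (boxhashB label) hc,
                  if_pos rfl, List.map_append]
                rfl
              · show ((PySem.List.pyGetD ns (boxhashB label) PySem.Dict.empty).insert label n).items = _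
                rw [PySem.Dict.items_insert, if_neg (by rw [hnsc, hc]; simp), hns,
                  boxF_insert_of_not_contains lenses label n (boxhashB label) hc, if_pos rfl]
            · rw [if_neg hbe, if_neg hbe]
              have hfix : boxF (lenses.insert label n) b = boxF lenses b := by
                rw [boxF_insert_of_not_contains lenses label n b hc,
                  if_neg (fun he => hbe he.symm), List.append_nil]
              rw [hfix]
              exact hinv b hb0 hb1
      · rw [if_neg hop2, if_neg hop2]
        exact ⟨⟨hlb, hln, hnd, hinv⟩, rfl⟩


lemma fold_pres (steps : List (List Char))
    (stA' : (List (List (List Char)) × List (PySem.Dict (List Char) Int)) × Int)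
    (stB' : PySem.Dict (List Char) Int × Int)
    (h : SimInv stA'.1.1 stA'.1.2 stB'.1) (hn : stA'.2 = stB'.2) :
    SimInv (steps.foldl stepA stA').1.1 (steps.foldl stepA stA').1.2 (steps.foldl stepB stB').1 := by
  induction steps generalizing stA' stB' with
  | nil => exact h
  | cons s rest ih =>
    obtain ⟨h1, h2⟩ := step_pres stA' stB' s h hn
    exact ih _ _ h1 h2

lemma simInv_init : SimInv (List.replicate 256 []) (List.replicate 256 PySem.Dict.empty) PySem.Dict.empty := by
  refine ⟨List.length_replicate, List.length_replicate,
    by rw [show (PySem.Dict.empty : PySem.Dict (List Char) Int).keys = [] from rfl]; exact List.nodup_nil, ?_⟩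
  intro b hb0 hb1
  have hlb : b < (((List.replicate 256 ([] : List (List Char))).length : Nat) : Int) := by
    rw [List.length_replicate]; exact hb1
  have hln : b < (((List.replicate 256 (PySem.Dict.empty : PySem.Dict (List Char) Int)).length : Nat) : Int) := by
    rw [List.length_replicate]; exact hb1
  rw [PySem.List.pyGetD_eq_getElem _ _ hb0 hlb, PySem.List.pyGetD_eq_getElem _ _ hb0 hln,
    List.getElem_replicate, List.getElem_replicate]
  exact ⟨rfl, rfl⟩

lemma enumerate_map {α β : Type} (f : α → β) (l : List α) (s : Int) :
    PySem.List.enumerate (l.map f) s = (PySem.List.enumerate l s).map (fun q => (q.1, f q.2)) := by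
  induction l generalizing s with
  | nil => rw [List.map_nil, PySem.List.enumerate_nil, PySem.List.enumerate_nil, List.map_nil]
  | cons x xs ih =>
    rw [List.map_cons, PySem.List.enumerate_cons, PySem.List.enumerate_cons, List.map_cons, ih]

lemma slotFold (b : Int) (l : List (List Char × Int)) : ∀ s t : Int,
    (l.foldl (fun (sj : Int × Int) q =>
        if boxhashB q.1 = b then (sj.1 + 1, sj.2 + (b + 1) * (sj.1 + 1) * q.2) else sj) (s, t)).2
      = t + ((PySem.List.enumerate (l.filter (fun p => boxhashB p.1 == b)) s).map
          (fun q => (b + 1) * (q.1 + 1) * q.2.2)).sum := by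
  induction l with
  | nil => intro s t; rw [List.foldl_nil, List.filter_nil, PySem.List.enumerate_nil]; simp
  | cons q l ih =>
    intro s t
    rw [List.foldl_cons]
    by_cases hq : boxhashB q.1 = b
    · rw [if_pos hq, List.filter_cons_of_pos (by simpa using hq), PySem.List.enumerate_cons,
        List.map_cons, List.sum_cons, ih (s + 1) _]
      ring
    · rw [if_neg hq, List.filter_cons_of_neg (by simpa using hq), ih s t]

lemma sumA_eq (b : Int) (d : PySem.Dict (List Char) Int) (fl : List (List Char × Int))
    (hit : d.items = fl) (hnd : d.keys.Nodup) : ∀ s : Int,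
    ((PySem.List.enumerate (fl.map Prod.fst) s).map
        (fun q => (b + 1) * (q.1 + 1) * (d.getD q.2 0))).sum
      = ((PySem.List.enumerate fl s).map (fun q => (b + 1) * (q.1 + 1) * q.2.2)).sum := by
  intro s
  rw [enumerate_map, List.map_map]
  congr 1
  apply List.map_congr_left
  intro q hq
  obtain ⟨k, hk, rfl⟩ := (PySem.List.mem_enumerate_iff fl s q).mp hq
  simp only [Function.comp]
  congr 1
  apply PySem.Dict.getD_of_mem_items _ _ hnd
  rw [hit]
  exact Prod.mk.eta ▸ List.getElem_mem hk

lemma score_eq (boxs : List (List (List Char))) (ns : List (PySem.Dict (List Char) Int))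
    (lenses : PySem.Dict (List Char) Int) (h : SimInv boxs ns lenses) :
    (PySem.List.enumerate boxs).foldl (fun tot p =>
      (PySem.List.enumerate p.2).foldl (fun tot q =>
        tot + (p.1 + 1) * (q.1 + 1) *
          ((PySem.List.pyGetD ns p.1 PySem.Dict.empty).getD q.2 0)) tot) 0 =
    (PySem.List.pyRange 0 256 1).foldl (fun total b =>
      (lenses.items.foldl (fun (sj : Int × Int) q =>
        if boxhashB q.1 = b then (sj.1 + 1, sj.2 + (b + 1) * (sj.1 + 1) * q.2) else sj)
        (0, total)).2) 0 := by
  obtain ⟨hlb, hln, hnd, hinv⟩ := h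
  simp only [slotFold, PySem.List.foldl_add]
  rw [PySem.List.enumerate_eq_map_pyRange boxs [], List.map_map]
  have hlen : PySem.List.len boxs = 256 := by simp [PySem.List.len, hlb]
  rw [hlen]
  refine congrArg (fun l : List Int => 0 + l.sum) ?_
  apply List.map_congr_left
  intro b hb
  simp only [Function.comp_apply]
  obtain ⟨hb0, hb1⟩ := PySem.List.mem_pyRange_one.mp hb
  have hbx := (hinv b hb0 hb1).1
  have hns := (hinv b hb0 hb1).2
  have hdnd : (PySem.List.pyGetD ns b PySem.Dict.empty).keys.Nodup := by
    show ((PySem.List.pyGetD ns b PySem.Dict.empty).items.map _).Nodup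
    rw [hns]
    exact nodup_map_fst_boxF lenses b hnd
  rw [hbx, sumA_eq b _ (boxF lenses b) hns hdnd 0]
  rfl

-- ===== VERDICT (by name: the statement is the Claim_ definition above) =====
theorem part2_spec : Claim_equal_part2 := by
  intro lines _ _
  unfold Spec_part2 part2 part2_alt
  cases hm : PySem.List.pyGet? lines 0 with
  | none => rfl
  | some l0 =>
    simp only
    exact score_eq _ _ _ (fold_pres (PySem.Chars.splitOn l0.toList [','])
      ((List.replicate 256 [], List.replicate 256 PySem.Dict.empty), 0)
      (PySem.Dict.empty, 0) simInv_init rfl)
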